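-- pv_equiv track=rewrite | github.com/mlinhard/exactly | client/exactly/console.py | _init_highlights
-- ===== SOURCE A (Python) =====
-- def _init_highlights(segments):
--     h = []
--     l = 0
--     for segment, safe in segments:
--         segment_length = len(segment)
--         if not safe:
--             segment_length *= 2
--             h.append((l, segment_length))
--         l += segment_length
--     return h
-- ===== SOURCE B (Python) =====
-- def _init_highlights(segments):
--     contribs = [len(s) if safe else 2 * len(s) for s, safe in segments]
--     offsets = [0]
--     for c in contribs:
--         offsets.append(offsets[-1] + c)
--     return [(start, 2 * len(s))
--             for (s, safe), start in zip(segments, offsets) if not safe]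
-- ===== Notes on version B (the rewrite author's own statement) =====
-- stated objective: alternative
-- what changed: Replaces the single loop threading a running offset with a two-pass decomposition: a contributions list, an explicit prefix-sum offset table, then a zip-and-filter comprehension selecting unsafe segments.
import Mathlib
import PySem

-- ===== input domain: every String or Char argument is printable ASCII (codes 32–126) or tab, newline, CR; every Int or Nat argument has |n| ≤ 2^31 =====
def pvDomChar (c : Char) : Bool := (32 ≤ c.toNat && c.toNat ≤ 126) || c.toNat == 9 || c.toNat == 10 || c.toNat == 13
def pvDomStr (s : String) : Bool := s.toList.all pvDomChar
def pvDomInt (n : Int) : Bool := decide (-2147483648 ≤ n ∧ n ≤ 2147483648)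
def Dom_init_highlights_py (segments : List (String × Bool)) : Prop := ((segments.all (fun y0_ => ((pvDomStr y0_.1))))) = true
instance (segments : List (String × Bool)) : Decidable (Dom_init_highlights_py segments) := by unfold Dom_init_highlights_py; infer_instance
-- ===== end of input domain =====

-- B replaces A's single offset-threading loop with a prefix-sum offset table plus a zip-and-filter pass (alternative decomposition, same cost).

-- ===== PORT A =====
-- A: one loop carrying (h, l); an unsafe segment doubles its length, appends (l, 2*len) and advances l by the doubled length.
def init_highlights_py (segments : List (String × Bool)) : List (Int × Int) :=
  (segments.foldl
    (fun (st : List (Int × Int) × Int) seg =>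
      let segment_length : Int := PySem.Str.len seg.1
      if !seg.2 then
        let segment_length := segment_length * 2
        (st.1 ++ [(st.2, segment_length)], st.2 + segment_length)
      else
        (st.1, st.2 + segment_length))
    ([], 0)).1

-- ===== PORT B =====
-- B line 1: contributions list (len if safe, 2*len if unsafe)
def pvContribs (segments : List (String × Bool)) : List Int :=
  segments.map (fun p => if p.2 then PySem.Str.len p.1 else 2 * PySem.Str.len p.1)

-- B lines 2-4: offsets table built by appending offsets[-1] + c, starting from [0]
def pvOffsets (cs : List Int) : List Int :=
  cs.foldl (fun acc c => acc ++ [acc.getLast! + c]) [0]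

-- B line 5: zip segments with their start offsets, keep the unsafe ones
def init_highlights_py_alt (segments : List (String × Bool)) : List (Int × Int) :=
  (segments.zip (pvOffsets (pvContribs segments))).filterMap
    (fun x => if x.1.2 then none else some (x.2, 2 * PySem.Str.len x.1.1))

-- ===== PRECONDITION & SPEC =====
def Spec_init_highlights_py (segments : List (String × Bool)) (out : List (Int × Int)) : Prop := out = init_highlights_py_alt segments
instance (segments : List (String × Bool)) (out : List (Int × Int)) : Decidable (Spec_init_highlights_py segments out) := by unfold Spec_init_highlights_py; infer_instance

-- ===== CLAIM (what is proved, stated in full; the proofs are below) =====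
def Claim_equal_init_highlights_py : Prop := ∀ (segments : List (String × Bool)), Dom_init_highlights_py segments → Spec_init_highlights_py segments (init_highlights_py segments)

-- ===== LEMMAS AND PROOFS =====

-- common recursive characterisation: highlights of `segments` when the first segment starts at offset l
def pvG (l : Int) : List (String × Bool) → List (Int × Int)
  | [] => []
  | (s, safe) :: rest =>
      if safe then pvG (l + PySem.Str.len s) rest
      else (l, PySem.Str.len s * 2) :: pvG (l + PySem.Str.len s * 2) rest

theorem pvA_eq (segs : List (String × Bool)) :
    ∀ (h : List (Int × Int)) (l : Int),
    (segs.foldl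
      (fun (st : List (Int × Int) × Int) seg =>
        let segment_length : Int := PySem.Str.len seg.1
        if !seg.2 then
          let segment_length := segment_length * 2
          (st.1 ++ [(st.2, segment_length)], st.2 + segment_length)
        else
          (st.1, st.2 + segment_length))
      (h, l)).1 = h ++ pvG l segs := by
  induction segs with
  | nil => intro h l; simp [pvG]
  | cons seg rest ih =>
      intro h l
      obtain ⟨s, safe⟩ := seg
      cases safe with
      | false =>
          simp only [List.foldl_cons]
          show (List.foldl _
            (h ++ [(l, PySem.Str.len s * 2)], l + PySem.Str.len s * 2) rest).1 = _
          rw [ih]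
          simp [pvG]
      | true =>
          simp only [List.foldl_cons]
          show (List.foldl _ (h, l + PySem.Str.len s) rest).1 = _
          rw [ih]
          simp [pvG]

-- the tail of B's offsets table is the running-offset scan
def pvScan (l : Int) : List Int → List Int
  | [] => []
  | c :: cs => (l + c) :: pvScan (l + c) cs

theorem pvGetLast!_concat (acc : List Int) (x : Int) : (acc ++ [x]).getLast! = x := by
  rw [List.getLast!_eq_getLast?_getD]; simp

theorem pvOffsets_eq (cs : List Int) :
    ∀ (acc : List Int) (x : Int),
    (cs.foldl (fun acc c => acc ++ [acc.getLast! + c]) (acc ++ [x]))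
      = acc ++ x :: pvScan x cs := by
  induction cs with
  | nil => intro acc x; simp [pvScan]
  | cons c cs ih =>
      intro acc x
      simp only [List.foldl_cons, pvGetLast!_concat]
      have := ih (acc ++ [x]) (x + c)
      simpa [pvScan, List.append_assoc] using this

theorem pvB_eq (segs : List (String × Bool)) : ∀ (l : Int),
    ((segs.zip (l :: pvScan l (pvContribs segs))).filterMap
      (fun x => if x.1.2 then none else some (x.2, 2 * PySem.Str.len x.1.1)))
      = pvG l segs := by
  induction segs with
  | nil => intro l; simp [pvG]
  | cons seg rest ih =>
      intro l
      obtain ⟨s, safe⟩ := seg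
      cases safe with
      | false =>
          simp only [pvContribs, List.map_cons, pvScan, List.zip_cons_cons,
            List.filterMap_cons, Bool.false_eq_true, ite_false, pvG]
          rw [← pvContribs]
          have h2 : (2 : Int) * PySem.Str.len s = PySem.Str.len s * 2 := by ring
          rw [h2, ih (l + PySem.Str.len s * 2)]
      | true =>
          simp only [pvContribs, List.map_cons, pvScan, List.zip_cons_cons,
            List.filterMap_cons, ite_true, pvG]
          rw [← pvContribs]
          exact ih (l + PySem.Str.len s)

-- ===== VERDICT (by name: the statement is the Claim_ definition above) =====
theorem init_highlights_py_spec : Claim_equal_init_highlights_py := by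
  intro segs _
  unfold Spec_init_highlights_py init_highlights_py init_highlights_py_alt pvOffsets
  rw [pvA_eq segs [] 0]
  rw [show ([0] : List Int) = [] ++ [(0:Int)] from rfl, pvOffsets_eq]
  simpa using (pvB_eq segs 0).symm
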